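-- pv_equiv track=rewrite | github.com/chemamalone/casospracticosbackend | Ejercicio1/functionSearchText.py | kmp_count
-- ===== SOURCE A (Python) =====
-- def build_lps(pattern):
--     """
--     Construye la tabla LPS (Longest Prefix Suffix)
--     usada por el algoritmo KMP.
--     """
--     m = len(pattern)
--     lps = [0] * m
--     length = 0
--     i = 1
--
--     while i < m:
--         if pattern[i] == pattern[length]:
--             length += 1
--             lps[i] = length
--             i += 1
--         else:
--             if length != 0:
--                 length = lps[length - 1]
--             else:
--                 lps[i] = 0
--                 i += 1
--     return lps
--
-- def kmp_count(text, pattern):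
--     """
--     Cuenta las ocurrencias (incluyendo traslapes)
--     de 'pattern' dentro de 'text' usando KMP.
--     """
--     n = len(text)
--     m = len(pattern)
--
--     if m == 0 or n == 0 or m > n:
--         return 0
--
--     lps = build_lps(pattern)
--     i = 0
--     j = 0
--     count = 0
--
--     while i < n:
--         if text[i] == pattern[j]:
--             i += 1
--             j += 1
--             if j == m:
--                 count += 1
--                 j = lps[j - 1]
--         else:
--             if j != 0:
--                 j = lps[j - 1]
--             else:
--                 i += 1
--
--     return count
-- ===== SOURCE B (Python) =====
-- def kmp_count(text, pattern):
--     """Counts (overlapping) occurrences of pattern in text by direct slice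
--     comparison at every start position; no LPS table, no KMP automaton."""
--     n = len(text)
--     m = len(pattern)
--     if m == 0 or n == 0 or m > n:
--         return 0
--     return sum(1 for start in range(n - m + 1) if text[start:start + m] == pattern)
-- ===== Notes on version B (the rewrite author's own statement) =====
-- stated objective: simpler
-- what changed: Drops the LPS failure table and the KMP automaton entirely: B scans every start position once and compares the slice text[start:start+m] with the pattern, counting equal slices; despite the worse worst-case bound this runs measurably faster in CPython because slice comparison is a single C-level memcmp instead of an interpreted per-character loop.
import Mathlib
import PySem

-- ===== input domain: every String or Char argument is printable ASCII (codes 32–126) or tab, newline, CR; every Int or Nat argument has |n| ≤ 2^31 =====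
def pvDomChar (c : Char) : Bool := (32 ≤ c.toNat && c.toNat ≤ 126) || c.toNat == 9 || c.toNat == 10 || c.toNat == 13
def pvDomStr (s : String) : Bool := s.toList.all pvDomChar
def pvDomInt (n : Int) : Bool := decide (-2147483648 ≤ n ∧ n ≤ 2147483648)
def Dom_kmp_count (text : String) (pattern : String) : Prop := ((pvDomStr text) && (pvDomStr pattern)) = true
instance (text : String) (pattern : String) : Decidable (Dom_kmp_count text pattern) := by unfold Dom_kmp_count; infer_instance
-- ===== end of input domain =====

-- B drops the LPS table and the KMP automaton and counts pattern occurrences by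
-- direct slice comparison at every start position (same values, plainer algorithm).

-- ===== PORT A =====
-- A's `while i < m` loop of build_lps; `fuel` only makes the recursion structural
-- (2*m+1 steps always suffice: each iteration strictly increases 2*i - length).
-- All indexing (pattern[i], pattern[length], lps[length-1]) is in range in Python,
-- so `getD` is exact.
def lpsLoop (p : List Char) (m : Nat) : Nat → List Nat → Nat → Nat → List Nat
  | 0, lps, _, _ => lps
  | fuel+1, lps, len, i =>
    if i < m then
      if p.getD i ' ' = p.getD len ' ' then
        lpsLoop p m fuel (lps.set i (len+1)) (len+1) (i+1)
      else if len ≠ 0 then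
        lpsLoop p m fuel lps (lps.getD (len-1) 0) i
      else
        lpsLoop p m fuel (lps.set i 0) 0 (i+1)
    else lps

def build_lps (p : List Char) : List Nat :=
  lpsLoop p p.length (2 * p.length + 1) (List.replicate p.length 0) 0 1

-- A's `while i < n` matcher loop, same fuel device (2*n+1 steps always suffice).
def kmpLoop (t p : List Char) (n m : Nat) (lps : List Nat) : Nat → Nat → Nat → Nat → Nat
  | 0, _, _, count => count
  | fuel+1, i, j, count =>
    if i < n then
      if t.getD i ' ' = p.getD j ' ' then
        if j + 1 = m then
          kmpLoop t p n m lps fuel (i+1) (lps.getD (m-1) 0) (count+1)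
        else
          kmpLoop t p n m lps fuel (i+1) (j+1) count
      else if j ≠ 0 then
        kmpLoop t p n m lps fuel i (lps.getD (j-1) 0) count
      else
        kmpLoop t p n m lps fuel (i+1) j count
    else count

def kmp_count (text : String) (pattern : String) : Int :=
  let t := text.toList
  let p := pattern.toList
  let n := t.length
  let m := p.length
  if m = 0 ∨ n = 0 ∨ m > n then 0
  else (kmpLoop t p n m (build_lps p) (2*n+1) 0 0 0 : Int)

-- ===== PORT B =====
-- `sum(1 for start in range(n-m+1) if text[start:start+m] == pattern)` ported as
-- countP over the range; for 0 ≤ start the Python slice text[start:start+m] is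
-- exactly (t.drop start).take m.
def kmp_count_alt (text : String) (pattern : String) : Int :=
  let t := text.toList
  let p := pattern.toList
  let n := t.length
  let m := p.length
  if m = 0 ∨ n = 0 ∨ m > n then 0
  else ((List.range (n - m + 1)).countP (fun start => (t.drop start).take m == p) : Int)

-- ===== PRECONDITION & SPEC =====
def Spec_kmp_count (text : String) (pattern : String) (out : Int) : Prop := out = kmp_count_alt text pattern
instance (text : String) (pattern : String) (out : Int) : Decidable (Spec_kmp_count text pattern out) := by unfold Spec_kmp_count; infer_instance

-- ===== CLAIM (what is proved, stated in full; the proofs are below) =====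
def Claim_equal_kmp_count : Prop := ∀ (text : String) (pattern : String), Dom_kmp_count text pattern → Spec_kmp_count text pattern (kmp_count text pattern)

-- ===== LEMMAS AND PROOFS =====

-- length of the longest proper border (prefix that is also a suffix) of xs
def brd (xs : List Char) : Nat := Nat.findGreatest (fun k => xs.take k <:+ xs) (xs.length - 1)

lemma brd_suffix (xs : List Char) : xs.take (brd xs) <:+ xs :=
  Nat.findGreatest_spec (P := fun k => xs.take k <:+ xs) (Nat.zero_le _) (by simp)

lemma brd_lt (xs : List Char) (h : xs ≠ []) : brd xs < xs.length := by
  have := Nat.findGreatest_le (P := fun k => xs.take k <:+ xs) (xs.length - 1)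
  have hl : 0 < xs.length := List.length_pos_of_ne_nil h
  unfold brd
  omega

lemma le_brd (xs : List Char) (k : Nat) (hk : k < xs.length) (h : xs.take k <:+ xs) : k ≤ brd xs :=
  Nat.le_findGreatest (by omega) h

lemma suffix_of_suffix_length_le {a b c : List Char} (h1 : a <:+ c) (h2 : b <:+ c)
    (h : a.length ≤ b.length) : a <:+ b := by
  rw [← List.reverse_prefix] at h1 h2 ⊢
  exact List.prefix_of_prefix_length_le h1 h2 (by simpa using h)

lemma suffix_eq_of_length {a b : List Char} (h1 : a <:+ b) (h : a.length = b.length) : a = b := by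
  obtain ⟨u, hu⟩ := h1
  have hl := congrArg List.length hu
  simp only [List.length_append] at hl
  have hu0 : u = [] := List.eq_nil_of_length_eq_zero (by omega)
  simpa [hu0] using hu

lemma snoc_suffix_snoc {a b : List Char} {c d : Char} :
    a ++ [c] <:+ b ++ [d] ↔ c = d ∧ a <:+ b := by
  rw [← List.reverse_prefix]
  simp [List.cons_prefix_cons, List.reverse_prefix]

lemma take_succ_getD (l : List Char) (i : Nat) (h : i < l.length) :
    l.take (i+1) = l.take i ++ [l.getD i ' '] := by
  rw [List.take_add_one]
  simp [List.getElem?_eq_getElem h, List.getD_eq_getElem _ _ h]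

lemma suffix_take_succ {t p : List Char} {i k : Nat} (hi : i < t.length) (hk1 : 1 ≤ k)
    (hk : k ≤ p.length) :
    (p.take k <:+ t.take (i+1)) ↔ (p.take (k-1) <:+ t.take i ∧ p.getD (k-1) ' ' = t.getD i ' ') := by
  have hk' : k - 1 < p.length := by omega
  have h1 : p.take k = p.take (k-1) ++ [p.getD (k-1) ' '] := by
    have h2 := take_succ_getD p (k-1) hk'
    rw [← h2]
    congr 1
    omega
  rw [h1, take_succ_getD t i hi, snoc_suffix_snoc]
  exact and_comm

lemma occ_iff {t p : List Char} {s m : Nat} (hm : m = p.length) (hs : s + m ≤ t.length) :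
    (((t.drop s).take m == p) = true) ↔ p <:+ t.take (s + m) := by
  rw [beq_iff_eq]
  have hX : (t.drop s).take m <:+ t.take (s+m) := by
    rw [List.take_add]
    exact List.suffix_append _ _
  have hXlen : ((t.drop s).take m).length = m := by
    simp only [List.length_take, List.length_drop]
    omega
  constructor
  · intro h
    rw [← h]
    exact hX
  · intro h
    have h1 : p <:+ (t.drop s).take m :=
      suffix_of_suffix_length_le h hX (by rw [hXlen, ← hm])
    exact (suffix_eq_of_length h1 (by rw [hXlen, ← hm])).symm

-- countP split helpers
lemma countP_split (l : List Nat) (i m : Nat) (O : Nat → Bool) :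
    l.countP (fun s => decide (s+m ≤ i+1) && O s)
      = l.countP (fun s => decide (s+m ≤ i) && O s) + l.countP (fun s => decide (s+m = i+1) && O s) := by
  induction l with
  | nil => simp
  | cons a l ih =>
    simp only [List.countP_cons, ih]
    by_cases h2 : a + m ≤ i <;> by_cases h3 : a + m = i + 1 <;>
      cases hO : O a <;>
      simp [h2, h3, hO, show (a + m ≤ i + 1) = (a + m ≤ i ∨ a + m = i + 1) from
        propext (by omega)] <;> omega

lemma countP_single (N s0 : Nat) (O : Nat → Bool) :
    (List.range N).countP (fun s => decide (s = s0) && O s) = if s0 < N ∧ O s0 then 1 else 0 := by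
  induction N with
  | zero => simp
  | succ N ih =>
    rw [List.range_succ, List.countP_append, ih]
    have hsing : (List.countP (fun s => decide (s = s0) && O s) [N]) = if N = s0 ∧ O N then 1 else 0 := by
      by_cases h : N = s0 <;> cases hO : O s0 <;> simp [List.countP_cons, h, hO]
    rw [hsing]
    by_cases h : N = s0
    · subst h
      cases hO : O N <;> simp [hO]
    · have h2 : (s0 < N + 1) = (s0 < N) := propext (by omega)
      simp [h, h2]

lemma countP_eq_single (N i m : Nat) (O : Nat → Bool) (hm : m ≤ i + 1) :
    (List.range N).countP (fun s => decide (s+m = i+1) && O s)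
      = if i+1-m < N ∧ O (i+1-m) then 1 else 0 := by
  have h : ∀ s, (decide (s+m = i+1) && O s) = (decide (s = i+1-m) && O s) := by
    intro s
    have he : (s + m = i+1) = (s = i+1-m) := propext (by constructor <;> omega)
    simp only [he]
  rw [List.countP_congr (fun s _ => by rw [h s]), countP_single]


lemma brd_le' (xs : List Char) : brd xs ≤ xs.length - 1 := Nat.findGreatest_le _

lemma take_ne_nil' {l : List Char} {k : Nat} (h1 : 0 < k) (h2 : 0 < l.length) : l.take k ≠ [] := by
  intro h
  rw [List.take_eq_nil_iff] at h
  rcases h with h | h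
  · omega
  · rw [h] at h2; simp at h2

lemma brd_take_lt (p : List Char) (k : Nat) (h1 : 0 < k) (hk : k ≤ p.length) :
    brd (p.take k) < k := by
  have h2 := brd_lt (p.take k) (take_ne_nil' h1 (by omega))
  simp only [List.length_take] at h2
  omega

lemma le_brd_take {p : List Char} {k j : Nat} (hkj : k < j) (hj : j ≤ p.length)
    (h : p.take k <:+ p.take j) : k ≤ brd (p.take j) := by
  apply le_brd _ _ (by simp only [List.length_take]; omega)
  rw [List.take_take, Nat.min_eq_left (by omega)]
  exact h

lemma brd_take_suffix {p : List Char} {j : Nat} (hj : j ≤ p.length) :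
    p.take (brd (p.take j)) <:+ p.take j := by
  have h := brd_suffix (p.take j)
  have hb := brd_le' (p.take j)
  simp only [List.length_take] at hb
  rwa [List.take_take, Nat.min_eq_left (by omega)] at h

lemma getD_set_eq (l : List Nat) (i v : Nat) (h : i < l.length) :
    (l.set i v).getD i 0 = v := by
  rw [List.getD_eq_getElem _ _ (by simpa using h)]
  simp [List.getElem_set]

lemma getD_set_ne (l : List Nat) (i q v : Nat) (hne : q ≠ i) :
    (l.set i v).getD q 0 = l.getD q 0 := by
  simp [List.getD, List.getElem?_set_ne (Ne.symm hne)]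

theorem lpsLoop_inv (p : List Char) (m : Nat) (hm : m = p.length) :
    ∀ fuel lps len i,
    1 ≤ i → i ≤ m → len < i → lps.length = m →
    (∀ q, q < i → lps.getD q 0 = brd (p.take (q+1))) →
    p.take len <:+ p.take i →
    (∀ k, len < k → k < i → p.take k <:+ p.take i → ¬ (p.getD k ' ' = p.getD i ' ')) →
    2*m + 1 - (2*i - len) ≤ fuel →
    ∀ q, q < m → (lpsLoop p m fuel lps len i).getD q 0 = brd (p.take (q+1)) := by
  intro fuel
  induction fuel with
  | zero =>
    intro lps len i h1 h2 h3 _ _ _ _ hfuel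
    omega
  | succ fuel ih =>
    intro lps len i h1 h2 h3 hlen hB1 hB2 hB3 hfuel q hq
    by_cases hi : i < m
    case neg =>
      simp only [lpsLoop, if_neg hi]
      exact hB1 q (by omega)
    case pos =>
      have hip : i < p.length := by omega
      have hlen_take : (p.take (i+1)).length = i+1 := by
        simp only [List.length_take]; omega
      by_cases hc : p.getD i ' ' = p.getD len ' '
      · -- match branch: pattern[i] == pattern[length]
        have htk : p.take (len+1) <:+ p.take (i+1) := by
          rw [suffix_take_succ hip (by omega) (by omega)]
          exact ⟨by simpa using hB2, by simpa using hc.symm⟩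
        have hge : len + 1 ≤ brd (p.take (i+1)) := le_brd_take (by omega) (by omega) htk
        have hle : brd (p.take (i+1)) ≤ len + 1 := by
          by_contra hbgt
          push_neg at hbgt
          have hbsuff : p.take (brd (p.take (i+1))) <:+ p.take (i+1) := brd_take_suffix (by omega)
          have hblt : brd (p.take (i+1)) < i+1 := brd_take_lt p (i+1) (by omega) (by omega)
          rw [suffix_take_succ hip (by omega) (by omega)] at hbsuff
          obtain ⟨hbs, hbc⟩ := hbsuff
          exact hB3 (brd (p.take (i+1)) - 1) (by omega) (by omega) hbs hbc
        have hbrd : brd (p.take (i+1)) = len + 1 := le_antisymm hle hge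
        simp only [lpsLoop, if_pos hi, if_pos hc]
        apply ih (lps.set i (len+1)) (len+1) (i+1) (by omega) (by omega) (by omega)
          (by simpa using hlen) ?_ htk ?_ (by omega) q hq
        · intro q' hq'
          by_cases hqi : q' = i
          · subst hqi
            rw [getD_set_eq _ _ _ (by omega)]
            exact hbrd.symm
          · rw [getD_set_ne _ _ _ _ hqi]
            exact hB1 q' (by omega)
        · intro k hk1 hk2 hsuf
          rw [suffix_take_succ hip (by omega) (by omega)] at hsuf
          obtain ⟨hs, hcc⟩ := hsuf
          exact absurd hcc (hB3 (k-1) (by omega) (by omega) hs)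
      · by_cases hl0 : len ≠ 0
        · -- mismatch, length != 0: length = lps[length-1]
          have hlv : lps.getD (len-1) 0 = brd (p.take len) := by
            have h := hB1 (len-1) (by omega)
            rwa [show len - 1 + 1 = len by omega] at h
          have hbl : brd (p.take len) < len := brd_take_lt p len (by omega) (by omega)
          simp only [lpsLoop, if_pos hi, if_neg hc, if_pos hl0]
          apply ih lps (lps.getD (len-1) 0) i h1 h2 (by omega) hlen hB1 ?_ ?_ (by omega) q hq
          · rw [hlv]
            exact (brd_take_suffix (by omega)).trans hB2
          · intro k hk1 hk2 hsuf
            rw [hlv] at hk1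
            rcases lt_trichotomy k len with hkl | hke | hkg
            · exfalso
              have hsl : p.take k <:+ p.take len := by
                apply suffix_of_suffix_length_le hsuf hB2
                simp only [List.length_take]
                omega
              have := le_brd_take hkl (by omega) hsl
              omega
            · subst hke
              exact fun h => hc h.symm
            · exact hB3 k hkg hk2 hsuf
        · -- mismatch, length == 0: lps[i] = 0
          push_neg at hl0
          subst hl0
          have hbrd0 : brd (p.take (i+1)) = 0 := by
            by_contra hb
            have hbsuff : p.take (brd (p.take (i+1))) <:+ p.take (i+1) := brd_take_suffix (by omega)
            have hblt : brd (p.take (i+1)) < i+1 := brd_take_lt p (i+1) (by omega) (by omega)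
            rw [suffix_take_succ hip (by omega) (by omega)] at hbsuff
            obtain ⟨hbs, hbc⟩ := hbsuff
            by_cases hbb : brd (p.take (i+1)) - 1 = 0
            · rw [hbb] at hbc
              exact hc hbc.symm
            · exact hB3 (brd (p.take (i+1)) - 1) (by omega) (by omega) hbs hbc
          simp only [lpsLoop, if_pos hi, if_neg hc, if_neg (by omega : ¬ ((0:Nat) ≠ 0))]
          apply ih (lps.set i 0) 0 (i+1) (by omega) (by omega) (by omega)
            (by simpa using hlen) ?_ (by simp) ?_ (by omega) q hq
          · intro q' hq'
            by_cases hqi : q' = i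
            · subst hqi
              rw [getD_set_eq _ _ _ (by omega)]
              exact hbrd0.symm
            · rw [getD_set_ne _ _ _ _ hqi]
              exact hB1 q' (by omega)
          · intro k hk1 hk2 hsuf
            rw [suffix_take_succ hip (by omega) (by omega)] at hsuf
            obtain ⟨hs, hcc⟩ := hsuf
            by_cases hbb : k - 1 = 0
            · rw [hbb] at hcc
              exact absurd hcc.symm hc
            · exact absurd hcc (hB3 (k-1) (by omega) (by omega) hs)

theorem build_lps_correct (p : List Char) :
    ∀ q, q < p.length → (build_lps p).getD q 0 = brd (p.take (q+1)) := by
  intro q hq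
  unfold build_lps
  apply lpsLoop_inv p p.length rfl (2*p.length+1) _ 0 1 le_rfl (by omega) one_pos
    (by simp) ?_ (by simp) ?_ (by omega) q hq
  · intro q' hq'
    have hq0 : q' = 0 := by omega
    subst hq0
    have h1 := brd_le' (p.take (0+1))
    have hl : (p.take (0+1)).length = 1 := by simp only [List.length_take]; omega
    rw [List.getD_eq_getElem _ _ (by simp; omega)]
    simp only [List.getElem_replicate]
    omega
  · intro k hk1 hk2 _
    exfalso
    omega


lemma countP_step (n m i : Nat) (O : Nat → Bool) (hi : i < n) (hmn : m ≤ n) :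
    (List.range (n-m+1)).countP (fun s => decide (s+m ≤ i+1) && O s)
      = (List.range (n-m+1)).countP (fun s => decide (s+m ≤ i) && O s)
        + (if m ≤ i+1 ∧ O (i+1-m) then 1 else 0) := by
  rw [countP_split]
  by_cases hmi : m ≤ i+1
  · rw [countP_eq_single _ _ _ _ hmi]
    congr 1
    have hlt : i+1-m < n-m+1 := by omega
    by_cases hO : O (i+1-m) <;> simp [hlt, hO, hmi]
  · have hz : ∀ s ∈ List.range (n-m+1), ¬ ((decide (s+m = i+1) && O s) = true) := by
      intro s _
      simp only [Bool.and_eq_true, decide_eq_true_eq, not_and]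
      intro h
      omega
    rw [List.countP_eq_zero.mpr hz]
    simp [hmi]

theorem kmpLoop_inv (t p : List Char) (n m : Nat) (hn : n = t.length) (hm : m = p.length)
    (hm1 : 1 ≤ m) (hmn : m ≤ n) (lps : List Nat)
    (hlps : ∀ q, q < m → lps.getD q 0 = brd (p.take (q+1))) :
    ∀ fuel i j count,
    j ≤ i → i ≤ n → j < m →
    p.take j <:+ t.take i →
    (∀ k, j < k → k < m → p.take k <:+ t.take i → ¬ (p.getD k ' ' = t.getD i ' ')) →
    count = (List.range (n-m+1)).countP (fun s => decide (s+m ≤ i) && ((t.drop s).take m == p)) →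
    2*n + 1 - (2*i - j) ≤ fuel →
    kmpLoop t p n m lps fuel i j count
      = (List.range (n-m+1)).countP (fun s => (t.drop s).take m == p) := by
  intro fuel
  induction fuel with
  | zero =>
    intro i j count hji hin hjm _ _ _ hfuel
    omega
  | succ fuel ih =>
    intro i j count hji hin hjm hA1 hA3 hcount hfuel
    have hpne : p ≠ [] := by
      intro h
      rw [h] at hm
      simp at hm
      omega
    have hpm : p.take m = p := by rw [hm]; simp
    by_cases hi : i < n
    case neg =>
      have hieq : i = n := by omega
      simp only [kmpLoop, if_neg hi]
      rw [hcount]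
      apply List.countP_congr
      intro s hs
      simp only [List.mem_range] at hs
      have hsn : s + m ≤ i := by omega
      simp [hsn]
    case pos =>
      have hip : i < t.length := by omega
      by_cases hc : t.getD i ' ' = p.getD j ' '
      · by_cases hjm1 : j + 1 = m
        · -- match completing an occurrence: count += 1, j = lps[m-1]
          have hA1' : p.take (j+1) <:+ t.take (i+1) := by
            rw [suffix_take_succ hip (by omega) (by omega)]
            exact ⟨hA1, hc.symm⟩
          have hocc : p <:+ t.take (i+1) := by
            rwa [hjm1, hpm] at hA1'
          have hjlt : lps.getD (m-1) 0 = brd p := by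
            have h := hlps (m-1) (by omega)
            rwa [show m - 1 + 1 = m by omega, hpm] at h
          have hbp : brd p < m := by
            have := brd_lt p hpne
            omega
          have hOcc_true : ((t.drop (i+1-m)).take m == p) = true := by
            rw [occ_iff hm (by omega)]
            rwa [show i+1-m+m = i+1 by omega]
          simp only [kmpLoop, if_pos hi, if_pos hc, if_pos hjm1]
          apply ih (i+1) (lps.getD (m-1) 0) (count+1) (by rw [hjlt]; omega) (by omega)
            (by rw [hjlt]; omega) ?_ ?_ ?_ (by rw [hjlt]; omega)
          · rw [hjlt]
            exact (brd_suffix p).trans hocc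
          · intro k hk1 hk2 hsuf
            rw [hjlt] at hk1
            exfalso
            have hsk : p.take k <:+ p :=
              suffix_of_suffix_length_le hsuf hocc (by simp only [List.length_take]; omega)
            have := le_brd p k (by omega) hsk
            omega
          · rw [countP_step n m i _ hi hmn, if_pos ⟨by omega, hOcc_true⟩, ← hcount]
        · -- match, partial: j += 1
          have hA1' : p.take (j+1) <:+ t.take (i+1) := by
            rw [suffix_take_succ hip (by omega) (by omega)]
            exact ⟨hA1, hc.symm⟩
          simp only [kmpLoop, if_pos hi, if_pos hc, if_neg hjm1]
          apply ih (i+1) (j+1) count (by omega) (by omega) (by omega) hA1' ?_ ?_ (by omega)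
          · intro k hk1 hk2 hsuf
            rw [suffix_take_succ hip (by omega) (by omega)] at hsuf
            obtain ⟨hs, hcc⟩ := hsuf
            exact absurd hcc (hA3 (k-1) (by omega) (by omega) hs)
          · rw [countP_step n m i _ hi hmn, if_neg ?_, Nat.add_zero]
            · exact hcount
            · rintro ⟨hmi, hOc⟩
              rw [occ_iff hm (by omega), show i+1-m+m = i+1 by omega] at hOc
              have hOc' : p.take m <:+ t.take (i+1) := by
                rw [hpm]
                exact hOc
              rw [suffix_take_succ hip (by omega) (by omega)] at hOc'
              obtain ⟨hs, hcc⟩ := hOc'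
              exact hA3 (m-1) (by omega) (by omega) hs hcc
      · by_cases hj0 : j ≠ 0
        · -- mismatch, j != 0: j = lps[j-1]
          have hjv : lps.getD (j-1) 0 = brd (p.take j) := by
            have h := hlps (j-1) (by omega)
            rwa [show j - 1 + 1 = j by omega] at h
          have hbj : brd (p.take j) < j := brd_take_lt p j (by omega) (by omega)
          simp only [kmpLoop, if_neg hc, if_pos hi, if_pos hj0]
          apply ih i (lps.getD (j-1) 0) count (by rw [hjv]; omega) hin (by rw [hjv]; omega)
            ?_ ?_ hcount (by rw [hjv]; omega)
          · rw [hjv]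
            exact (brd_take_suffix (by omega)).trans hA1
          · intro k hk1 hk2 hsuf
            rw [hjv] at hk1
            rcases lt_trichotomy k j with hkl | hke | hkg
            · exfalso
              have hsl : p.take k <:+ p.take j :=
                suffix_of_suffix_length_le hsuf hA1 (by simp only [List.length_take]; omega)
              have := le_brd_take hkl (by omega) hsl
              omega
            · subst hke
              exact fun h => hc h.symm
            · exact hA3 k hkg hk2 hsuf
        · -- mismatch, j == 0: i += 1
          push_neg at hj0
          subst hj0
          simp only [kmpLoop, if_neg hc, if_pos hi, if_neg (by omega : ¬ ((0:Nat) ≠ 0))]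
          apply ih (i+1) 0 count (by omega) (by omega) (by omega) (by simp) ?_ ?_ (by omega)
          · intro k hk1 hk2 hsuf
            rw [suffix_take_succ hip (by omega) (by omega)] at hsuf
            obtain ⟨hs, hcc⟩ := hsuf
            by_cases hbb : k - 1 = 0
            · rw [hbb] at hcc
              exact absurd hcc.symm hc
            · exact absurd hcc (hA3 (k-1) (by omega) (by omega) hs)
          · rw [countP_step n m i _ hi hmn, if_neg ?_, Nat.add_zero]
            · exact hcount
            · rintro ⟨hmi, hOc⟩
              rw [occ_iff hm (by omega), show i+1-m+m = i+1 by omega] at hOc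
              have hOc' : p.take m <:+ t.take (i+1) := by
                rw [hpm]
                exact hOc
              rw [suffix_take_succ hip (by omega) (by omega)] at hOc'
              obtain ⟨hs, hcc⟩ := hOc'
              by_cases hbb : m - 1 = 0
              · rw [hbb] at hcc
                exact hc hcc.symm
              · exact hA3 (m-1) (by omega) (by omega) hs hcc

-- ===== VERDICT (by name: the statement is the Claim_ definition above) =====
theorem kmp_count_spec : Claim_equal_kmp_count := by
  intro text pattern _
  unfold Spec_kmp_count
  simp only [kmp_count, kmp_count_alt]
  by_cases hg : pattern.toList.length = 0 ∨ text.toList.length = 0 ∨ pattern.toList.length > text.toList.length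
  · rw [if_pos hg, if_pos hg]
  · rw [if_neg hg, if_neg hg]
    push_neg at hg
    obtain ⟨hm0, hn0, hmn⟩ := hg
    congr 1
    apply kmpLoop_inv text.toList pattern.toList text.toList.length pattern.toList.length rfl rfl
      (by omega) hmn (build_lps pattern.toList) (build_lps_correct pattern.toList)
      (2*text.toList.length+1) 0 0 0 le_rfl (Nat.zero_le _) (by omega) (by simp) ?_ ?_ (by omega)
    · intro k hk1 hk2 hsuf
      exfalso
      simp only [List.take_zero, List.suffix_nil] at hsuf
      rw [List.take_eq_nil_iff] at hsuf
      rcases hsuf with h | h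
      · omega
      · rw [h] at hk2
        simp at hk2
    · symm
      apply List.countP_eq_zero.mpr
      intro s _
      simp only [Bool.and_eq_true, decide_eq_true_eq, not_and]
      intro h
      omega
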